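-- pv_equiv track=rewrite | github.com/geemaple/leetcode | leetcode/395.longest-substring-with-at-least-k-repeating-characters.py | longestSubstringWithUnique
-- ===== SOURCE A (Python) =====
-- from collections import defaultdict
--
-- def longestSubstringWithUnique(s: str, k: int, target: int) -> int:
--
--     n = len(s)
--     counter = defaultdict(int)
--     count = 0
--     i = 0
--     res = 0
--     for j in range(n):
--         counter[s[j]] += 1
--         if counter[s[j]] == k:
--             count += 1
--
--         while (len(counter) > target):
--             counter[s[i]] -= 1
--             if counter[s[i]] == k - 1:
--                 count -= 1
--             if counter[s[i]] == 0:
--                 del counter[s[i]]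
--             i += 1
--
--         if len(counter) == target and len(counter) == count:
--             res = max(res, j - i + 1)
--
--     return res
-- ===== SOURCE B (Python) =====
-- def longestSubstringWithUnique(s: str, k: int, target: int) -> int:
--     n = len(s)
--     res = 0
--     for i in range(n):
--         counter = {}
--         count = 0
--         for j in range(i, n):
--             c = s[j]
--             counter[c] = counter.get(c, 0) + 1
--             if counter[c] == k:
--                 count += 1
--             if len(counter) > target:
--                 break
--             if len(counter) == target and count == target:
--                 res = max(res, j - i + 1)
--     return res
-- ===== Notes on version B (the rewrite author's own statement) =====
-- stated objective: simpler
-- what changed: Replaces the sliding window (shrinking start pointer, counter decrements and deletions) by a per-start brute-force scan: for each start i a fresh counter is grown rightwards and the row is abandoned as soon as the distinct count exceeds target.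
import Mathlib
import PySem

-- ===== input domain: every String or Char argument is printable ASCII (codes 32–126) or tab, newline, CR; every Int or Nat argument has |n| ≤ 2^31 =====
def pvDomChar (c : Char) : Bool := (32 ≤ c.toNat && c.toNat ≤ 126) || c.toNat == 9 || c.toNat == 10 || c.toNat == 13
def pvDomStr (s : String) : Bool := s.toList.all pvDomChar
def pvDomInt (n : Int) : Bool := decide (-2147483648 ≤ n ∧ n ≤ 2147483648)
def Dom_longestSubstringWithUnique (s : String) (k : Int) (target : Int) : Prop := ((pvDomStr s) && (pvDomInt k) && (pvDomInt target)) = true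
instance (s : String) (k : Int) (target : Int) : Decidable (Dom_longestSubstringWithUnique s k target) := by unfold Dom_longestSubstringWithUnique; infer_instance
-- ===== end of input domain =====

-- B replaces A's sliding window by a per-start brute-force scan with an early break: simpler logic
-- (no window shrinking, no deletions), same results. Equivalence is proved on all inputs where A
-- returns (Pre_ excludes target < 0 on nonempty s, where A raises IndexError).

-- ===== PORT A =====
-- the inner 'while len(counter) > target' loop of A; fuel makes it total, `none` from pyGet? is
-- Python's IndexError (unreachable under Pre_)
def pvShrinkA (l : List Char) (k target : Int) : Nat → PySem.Dict Char Int × Int × Int → PySem.Dict Char Int × Int × Int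
  | 0, st => st
  | fuel+1, (counter, count, i) =>
    if target < (counter.size : Int) then
      match PySem.List.pyGet? l i with
      | none => (counter, count, i)
      | some c =>
        let counter1 := counter.modify c 0 (· - 1)
        let count1 := if counter1.getD c 0 = k - 1 then count - 1 else count
        let counter2 := if counter1.getD c 0 = 0 then counter1.erase c else counter1
        pvShrinkA l k target fuel (counter2, count1, i + 1)
    else (counter, count, i)

-- one iteration of A's 'for j in range(n)' loop
def pvStepA (l : List Char) (k target : Int) (st : PySem.Dict Char Int × Int × Int × Int) (j : Int) : PySem.Dict Char Int × Int × Int × Int :=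
  match PySem.List.pyGet? l j with
  | none => st
  | some c =>
    let (counter, count, i, res) := st
    let counter := counter.modify c 0 (· + 1)
    let count := if counter.getD c 0 = k then count + 1 else count
    let (counter, count, i) := pvShrinkA l k target (l.length + 1) (counter, count, i)
    let res := if (counter.size : Int) = target ∧ (counter.size : Int) = count then max res (j - i + 1) else res
    (counter, count, i, res)

def longestSubstringWithUnique (s : String) (k : Int) (target : Int) : Int :=
  ((PySem.List.pyRange 0 (s.toList.length : Int)).foldl (pvStepA s.toList k target)
    (PySem.Dict.empty, 0, 0, 0)).2.2.2

-- ===== PORT B =====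
-- the inner 'for j in range(i, n)' loop of B; returning res models 'break'
def pvInnerB (l : List Char) (k target : Int) (i : Int) : List Int → PySem.Dict Char Int × Int × Int → Int
  | [], st => st.2.2
  | j :: js, (counter, count, res) =>
    match PySem.List.pyGet? l j with
    | none => res
    | some c =>
      let counter := counter.insert c (counter.getD c 0 + 1)
      let count := if counter.getD c 0 = k then count + 1 else count
      if target < (counter.size : Int) then res
      else
        let res := if (counter.size : Int) = target ∧ count = target then max res (j - i + 1) else res
        pvInnerB l k target i js (counter, count, res)

def longestSubstringWithUnique_alt (s : String) (k : Int) (target : Int) : Int :=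
  (PySem.List.pyRange 0 (s.toList.length : Int)).foldl
    (fun res i => pvInnerB s.toList k target i (PySem.List.pyRange i (s.toList.length : Int)) (PySem.Dict.empty, 0, res)) 0

-- ===== PRECONDITION & SPEC =====
-- Pre_ excludes exactly the inputs where A raises IndexError: a negative target with a nonempty s
-- (the shrink loop then runs i past the end of s).
def Pre_longestSubstringWithUnique (s : String) (k : Int) (target : Int) : Prop := 0 ≤ target ∨ s = ""
instance (s : String) (k : Int) (target : Int) : Decidable (Pre_longestSubstringWithUnique s k target) := by unfold Pre_longestSubstringWithUnique; infer_instance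
def pvWitness_longestSubstringWithUnique : String × Int × Int := ("aabbc", 2, 2)

def Spec_longestSubstringWithUnique (s : String) (k : Int) (target : Int) (out : Int) : Prop := out = longestSubstringWithUnique_alt s k target
instance (s : String) (k : Int) (target : Int) (out : Int) : Decidable (Spec_longestSubstringWithUnique s k target out) := by unfold Spec_longestSubstringWithUnique; infer_instance

-- ===== CLAIM (what is proved, stated in full; the proofs are below) =====
def Claim_equal_longestSubstringWithUnique : Prop := ∀ (s : String) (k : Int) (target : Int), Dom_longestSubstringWithUnique s k target → Pre_longestSubstringWithUnique s k target → Spec_longestSubstringWithUnique s k target (longestSubstringWithUnique s k target)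
-- ===== LEMMAS AND PROOFS =====

-- window of first m chars starting at i
def pvWin (l : List Char) (i m : Nat) : List Char := (l.take m).drop i
def pvCard (w : List Char) : Int := (w.toFinset.card : Int)
def pvSat (k : Int) (w : List Char) : Int :=
  if 1 ≤ k then ((w.toFinset.filter (fun c => k ≤ (w.count c : Int))).card : Int) else 0
def pvGood (l : List Char) (k target : Int) (i j : Nat) : Prop :=
  pvCard (pvWin l i (j+1)) = target ∧ pvSat k (pvWin l i (j+1)) = target
def pvRep (d : PySem.Dict Char Int) (w : List Char) : Prop :=
  d.keys.Nodup ∧ ∀ c, d.get? c = if w.count c = 0 then none else some (w.count c : Int)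

theorem pvWin_of_le (l : List Char) {i m : Nat} (h : m ≤ i) : pvWin l i m = [] := by
  unfold pvWin
  apply List.drop_eq_nil_of_le
  exact le_trans (l.length_take_le m) h

theorem pvWin_snoc (l : List Char) {i m : Nat} (h1 : i ≤ m) (h2 : m < l.length) :
    pvWin l i (m+1) = pvWin l i m ++ [l[m]] := by
  unfold pvWin
  rw [List.take_add_one, List.drop_append_of_le_length (by simp [List.length_take]; omega)]
  simp [List.getElem?_eq_getElem h2]

theorem pvWin_cons (l : List Char) {i m : Nat} (h1 : i < m) (h2 : i < l.length) :
    pvWin l i m = l[i] :: pvWin l (i+1) m := by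
  unfold pvWin
  rw [List.drop_eq_getElem_cons (by simp [List.length_take]; omega)]
  simp [List.getElem_take]

theorem pvWin_length (l : List Char) (i m : Nat) (h : m ≤ l.length) :
    (pvWin l i m).length = m - i := by
  simp [pvWin, List.length_drop, List.length_take]; omega

theorem pvWin_drop (l : List Char) (i i' m : Nat) (h : i ≤ i') :
    pvWin l i' m = (pvWin l i m).drop (i' - i) := by
  unfold pvWin
  rw [List.drop_drop]
  congr 1
  omega

theorem pvWin_sublist_start (l : List Char) {i i' m : Nat} (h : i ≤ i') :
    (pvWin l i' m).Sublist (pvWin l i m) := by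
  rw [pvWin_drop l i i' m h]; exact List.drop_sublist _ _

theorem pvWin_subset_start (l : List Char) {i i' m : Nat} (h : i ≤ i') :
    pvWin l i' m ⊆ pvWin l i m := (pvWin_sublist_start l h).subset

theorem pvWin_subset_stop (l : List Char) {i m m' : Nat} (h : m ≤ m') :
    pvWin l i m ⊆ pvWin l i m' := by
  unfold pvWin
  rw [show l.take m = (l.take m').take m by rw [List.take_take]; congr 1; omega,
     List.drop_take]
  exact List.take_subset _ _

theorem pvCard_mono {w w' : List Char} (h : w ⊆ w') : pvCard w ≤ pvCard w' := by
  unfold pvCard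
  have hs : w.toFinset ⊆ w'.toFinset := by
    intro x hx
    simp only [List.mem_toFinset] at *
    exact h hx
  exact_mod_cast Finset.card_le_card hs

theorem pvCard_pos {w : List Char} (h : w ≠ []) : 0 < pvCard w := by
  unfold pvCard
  have : w.toFinset.Nonempty := by
    rcases List.exists_mem_of_ne_nil w h with ⟨x, hx⟩
    exact ⟨x, List.mem_toFinset.mpr hx⟩
  exact_mod_cast Finset.card_pos.mpr this

theorem pvSat_congr (k : Int) {w w' : List Char} (h : ∀ x, w.count x = w'.count x) :
    pvSat k w = pvSat k w' := by
  have hf : w.toFinset = w'.toFinset := by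
    ext x
    simp only [List.mem_toFinset, ← List.count_pos_iff, h]
  unfold pvSat
  rw [hf]
  have hfil : {c ∈ w'.toFinset | k ≤ ((w.count c : Nat) : Int)}
      = {c ∈ w'.toFinset | k ≤ ((w'.count c : Nat) : Int)} :=
    Finset.filter_congr (fun x _ => by rw [h])
  rw [hfil]

theorem pvSat_nil (k : Int) : pvSat k [] = 0 := by
  unfold pvSat
  split <;> simp

theorem pvSat_cons (k : Int) (c : Char) (w : List Char) :
    pvSat k (c :: w) = if ((w.count c : Int) + 1 = k) then pvSat k w + 1 else pvSat k w := by
  by_cases hk : 1 ≤ k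
  · unfold pvSat
    rw [if_pos hk, if_pos hk]
    have hS : (c :: w).toFinset = insert c w.toFinset := by simp
    have hcnt : ∀ x : Char, (c :: w).count x = w.count x + (if x = c then 1 else 0) := by
      intro x
      rw [List.count_cons]
      by_cases hxc : x = c
      · simp [hxc]
      · have : (c == x) = false := beq_eq_false_iff_ne.mpr (fun h => hxc h.symm)
        simp [hxc, this]
    by_cases hc : c ∈ w.toFinset
    · have hins : insert c w.toFinset = w.toFinset := Finset.insert_eq_self.mpr hc
      rw [hS, hins]
      have hsplit : ∀ (p : Char → Prop) (_ : DecidablePred p),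
          (w.toFinset.filter p).card
            = (if p c then 1 else 0) + ((w.toFinset.erase c).filter p).card := by
        intro p hp
        rw [Finset.filter_erase]
        by_cases hpc : p c
        · rw [if_pos hpc]
          have hcf : c ∈ w.toFinset.filter p := Finset.mem_filter.mpr ⟨hc, hpc⟩
          rw [Finset.card_erase_of_mem hcf]
          have : 0 < (w.toFinset.filter p).card := Finset.card_pos.mpr ⟨c, hcf⟩
          omega
        · rw [if_neg hpc, Finset.erase_eq_of_notMem (fun hmem => hpc (Finset.mem_filter.mp hmem).2)]
          omega
      rw [hsplit _ _, hsplit _ _]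
      have herase : ((w.toFinset.erase c).filter (fun x => k ≤ ((c :: w).count x : Int))).card
          = ((w.toFinset.erase c).filter (fun x => k ≤ (w.count x : Int))).card := by
        congr 1
        apply Finset.filter_congr
        intro x hx
        have hxc : x ≠ c := Finset.ne_of_mem_erase hx
        rw [hcnt x, if_neg hxc, Nat.add_zero]
      rw [herase]
      have hcc : (c :: w).count c = w.count c + 1 := by rw [hcnt]; simp
      have hwc : 0 < w.count c := List.count_pos_iff.mpr (List.mem_toFinset.mp hc)
      rw [hcc]
      split <;> split <;> split <;> push_cast <;> omega
    · have hwc : w.count c = 0 := by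
        rw [List.count_eq_zero]
        exact fun hm => hc (List.mem_toFinset.mpr hm)
      rw [hS, Finset.filter_insert]
      have hrest : (w.toFinset.filter (fun x => k ≤ ((c :: w).count x : Int))).card
          = (w.toFinset.filter (fun x => k ≤ (w.count x : Int))).card := by
        congr 1
        apply Finset.filter_congr
        intro x hx
        have hxc : x ≠ c := fun he => hc (he ▸ hx)
        rw [hcnt x, if_neg hxc, Nat.add_zero]
      have hcc : ((c :: w).count c : Int) = (w.count c : Int) + 1 := by rw [hcnt]; simp
      rw [hwc]
      by_cases hkc : k ≤ ((c :: w).count c : Int)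
      · rw [if_pos hkc, Finset.card_insert_of_notMem (fun hm => hc (Finset.mem_filter.mp hm).1), hrest]
        rw [hcc, hwc] at hkc
        split <;> omega
      · rw [if_neg hkc, hrest]
        rw [hcc, hwc] at hkc
        split <;> omega
  · unfold pvSat
    rw [if_neg hk, if_neg hk, if_neg (by omega)]

theorem pvSat_snoc (k : Int) (c : Char) (w : List Char) :
    pvSat k (w ++ [c]) = if ((w.count c : Int) + 1 = k) then pvSat k w + 1 else pvSat k w := by
  rw [pvSat_congr k (w' := c :: w) (fun x => by simp [List.count_append, List.count_cons]; try omega),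
      pvSat_cons]

theorem pvSat_eq_card {k : Int} {w : List Char} (hk : 1 ≤ k)
    (hall : ∀ c ∈ w, k ≤ (w.count c : Int)) : pvSat k w = pvCard w := by
  unfold pvSat pvCard
  rw [if_pos hk, Finset.filter_true_of_mem (fun c hc => hall c (List.mem_toFinset.mp hc))]

theorem pvSat_all_of_eq_card {k : Int} {w : List Char} (hk : 1 ≤ k)
    (h : pvSat k w = pvCard w) : ∀ c ∈ w, k ≤ (w.count c : Int) := by
  unfold pvSat pvCard at h
  rw [if_pos hk] at h
  have hcard : w.toFinset.card ≤ (w.toFinset.filter (fun c => k ≤ (w.count c : Int))).card := by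
    omega
  have heq := Finset.eq_of_subset_of_card_le (Finset.filter_subset _ _) hcard
  intro c hc
  have hmem : c ∈ w.toFinset := List.mem_toFinset.mpr hc
  rw [← heq] at hmem
  exact (Finset.mem_filter.mp hmem).2

theorem pv_find?_filter_ne (items : List (Char × Int)) (c c' : Char) :
    List.find? (fun p => p.1 == c') (items.filter (fun p => !(p.1 == c)))
      = if c' = c then none else List.find? (fun p => p.1 == c') items := by
  induction items with
  | nil => split <;> simp
  | cons p rest ih =>
    rcases p with ⟨a, v⟩
    by_cases hac : a = c
    · have hb : (a == c) = true := beq_iff_eq.mpr hac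
      rw [List.filter_cons]
      simp only [hb, Bool.not_true]
      rw [if_neg (by simp)]
      rw [ih]
      by_cases hc' : c' = c
      · rw [if_pos hc', if_pos hc']
      · rw [if_neg hc', if_neg hc', List.find?_cons]
        have : (a == c') = false := beq_eq_false_iff_ne.mpr (fun h => hc' (h ▸ hac ▸ rfl))
        rw [this]
    · have hb : (a == c) = false := beq_eq_false_iff_ne.mpr hac
      rw [List.filter_cons]
      simp only [hb, Bool.not_false]
      rw [if_pos trivial]
      by_cases hac' : a = c'
      · have hb2 : (a == c') = true := beq_iff_eq.mpr hac'
        have hcc : ¬ c' = c := fun h => hac (hac' ▸ h ▸ rfl)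
        simp [hb2, hcc]
      · have hb2 : (a == c') = false := beq_eq_false_iff_ne.mpr hac'
        simpa [List.find?_cons, hb2] using ih

theorem pv_get?_erase (d : PySem.Dict Char Int) (c c' : Char) :
    (d.erase c).get? c' = if c' = c then none else d.get? c' := by
  rcases d with ⟨items⟩
  show (Option.map _ (List.find? _ (items.filter _))) = _
  rw [pv_find?_filter_ne items c c']
  by_cases hc' : c' = c
  · rw [if_pos hc', if_pos hc']
    rfl
  · rw [if_neg hc', if_neg hc']
    rfl

theorem pv_nodup_keys_erase (d : PySem.Dict Char Int) (c : Char) (h : d.keys.Nodup) :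
    (d.erase c).keys.Nodup := by
  rcases d with ⟨items⟩
  have h1 : (items.filter (fun p => !(p.1 == c))).Sublist items := List.filter_sublist
  have hsub := h1.map (fun p : Char × Int => p.1)
  exact h.sublist hsub

theorem pvRep_getD {d : PySem.Dict Char Int} {w : List Char} (h : pvRep d w) (c : Char) :
    d.getD c 0 = (w.count c : Int) := by
  rw [PySem.Dict.getD_eq_get?_getD, h.2 c]
  by_cases hc : w.count c = 0 <;> simp [hc]

theorem pvRep_empty : pvRep PySem.Dict.empty [] := by
  constructor
  · simp [PySem.Dict.keys, PySem.Dict.empty]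
  · intro c
    simp [PySem.Dict.get?_empty]

theorem pvRep_bump {d : PySem.Dict Char Int} {w : List Char} (h : pvRep d w) (c : Char) :
    pvRep (d.insert c (d.getD c 0 + 1)) (w ++ [c]) := by
  refine ⟨PySem.Dict.nodup_keys_insert _ _ _ h.1, fun x => ?_⟩
  rw [PySem.Dict.get?_insert]
  by_cases hxc : x = c
  · subst hxc
    rw [if_pos rfl, pvRep_getD h x]
    have hc1 : (w ++ [x]).count x = w.count x + 1 := by simp
    rw [hc1, if_neg (Nat.succ_ne_zero _)]
    push_cast
    ring_nf
  · have hb : (c == x) = false := beq_eq_false_iff_ne.mpr (fun hh => hxc hh.symm)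
    have hcnt : (w ++ [c]).count x = w.count x := by
      rw [List.count_append, List.count_eq_zero.mpr (by simp [hxc] : x ∉ [c]), Nat.add_zero]
    
    rw [if_neg hxc, hcnt, h.2 x]

theorem pvRep_pop {d : PySem.Dict Char Int} {w : List Char} {c : Char} (h : pvRep d (c :: w)) :
    (d.insert c (d.getD c 0 - 1)).getD c 0 = (w.count c : Int) ∧
    pvRep (if (d.insert c (d.getD c 0 - 1)).getD c 0 = 0
           then (d.insert c (d.getD c 0 - 1)).erase c
           else d.insert c (d.getD c 0 - 1)) w := by
  have hccnt : (c :: w).count c = w.count c + 1 := by simp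
  have hgd : (d.insert c (d.getD c 0 - 1)).getD c 0 = (w.count c : Int) := by
    rw [PySem.Dict.getD_insert_self, pvRep_getD h c, hccnt]
    push_cast
    ring
  refine ⟨hgd, ?_⟩
  have hnodup : (d.insert c (d.getD c 0 - 1)).keys.Nodup :=
    PySem.Dict.nodup_keys_insert _ _ _ h.1
  have hget : ∀ x, x ≠ c → (d.insert c (d.getD c 0 - 1)).get? x
      = (if w.count x = 0 then none else some (w.count x : Int)) := by
    intro x hxc
    rw [PySem.Dict.get?_insert, if_neg hxc, h.2 x]
    have : (c :: w).count x = w.count x := by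
      simp [List.count_cons, beq_eq_false_iff_ne.mpr (fun hh : c = x => hxc hh.symm)]
    rw [this]
  by_cases hz : (d.insert c (d.getD c 0 - 1)).getD c 0 = 0
  · rw [if_pos hz]
    refine ⟨pv_nodup_keys_erase _ _ hnodup, fun x => ?_⟩
    rw [pv_get?_erase]
    by_cases hxc : x = c
    · subst hxc
      rw [if_pos rfl]
      have : w.count x = 0 := by
        have := hgd ▸ hz
        exact_mod_cast this
      rw [if_pos this]
    · rw [if_neg hxc, hget x hxc]
  · rw [if_neg hz]
    refine ⟨hnodup, fun x => ?_⟩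
    by_cases hxc : x = c
    · subst hxc
      have hcw : w.count x ≠ 0 := by
        intro h0
        apply hz
        rw [hgd, h0]
        simp
      rw [PySem.Dict.get?_insert, if_pos rfl, if_neg hcw]
      rw [show d.getD x 0 - 1 = (w.count x : Int) from by
        rw [pvRep_getD h x, hccnt]; push_cast; ring]
    · rw [hget x hxc]

theorem pvRep_size {d : PySem.Dict Char Int} {w : List Char} (h : pvRep d w) :
    (d.size : Int) = pvCard w := by
  have hmem : ∀ c, c ∈ d.keys ↔ c ∈ w.dedup := by
    intro c
    rw [List.mem_dedup]
    constructor
    · intro hc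
      by_contra hw
      have h0 : w.count c = 0 := List.count_eq_zero.mpr hw
      have := h.2 c
      rw [if_pos h0] at this
      exact (PySem.Dict.get?_eq_none_iff_not_mem_keys d c).mp this hc
    · intro hw
      by_contra hc
      have := (PySem.Dict.get?_eq_none_iff_not_mem_keys d c).mpr hc
      rw [h.2 c] at this
      rw [if_neg (by exact fun h0 => (List.count_eq_zero.mp h0) hw)] at this
      simp at this
  have hperm : d.keys.Perm w.dedup :=
    (List.perm_ext_iff_of_nodup h.1 w.nodup_dedup).mpr hmem
  have hlen : d.keys.length = w.dedup.length := hperm.length_eq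
  have hsize : d.size = d.keys.length := by
    simp [PySem.Dict.size, PySem.Dict.keys]
  rw [hsize, hlen]
  unfold pvCard
  rw [List.card_toFinset]

theorem pvCard_nil : pvCard [] = 0 := by simp [pvCard]

theorem pvShrink_spec (l : List Char) (k target : Int) (ht : 0 ≤ target) {m : Nat} (hm : m ≤ l.length)
    (fuel : Nat) :
    ∀ (iN : Nat) (d : PySem.Dict Char Int) (count : Int),
      pvRep d (pvWin l iN m) → count = pvSat k (pvWin l iN m) → iN ≤ m →
      (iN = 0 ∨ target < pvCard (pvWin l (iN-1) m)) → m - iN < fuel →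
      ∃ (d' : PySem.Dict Char Int) (count' : Int) (iN' : Nat),
        pvShrinkA l k target fuel (d, count, (iN : Int)) = (d', count', (iN' : Int)) ∧
        pvRep d' (pvWin l iN' m) ∧ count' = pvSat k (pvWin l iN' m) ∧
        iN ≤ iN' ∧ iN' ≤ m ∧ pvCard (pvWin l iN' m) ≤ target ∧
        (iN' = 0 ∨ target < pvCard (pvWin l (iN'-1) m)) := by
  induction fuel with
  | zero => intro iN d count _ _ _ _ h5; omega
  | succ f ih =>
    intro iN d count h1 h2 h3 h4 h5
    by_cases hgt : target < (d.size : Int)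
    · have hcard : (d.size : Int) = pvCard (pvWin l iN m) := pvRep_size h1
      have hne : pvWin l iN m ≠ [] := by
        intro h0
        rw [hcard, h0, pvCard_nil] at hgt
        omega
      have hiN : iN < m := by
        by_contra hge
        exact hne (pvWin_of_le l (by omega))
      have hlen : iN < l.length := lt_of_lt_of_le hiN hm
      have hpy : PySem.List.pyGet? l (iN : Int) = some l[iN] := by
        rw [PySem.List.pyGet?_natCast, List.getElem?_eq_getElem hlen]
      have hwin : pvWin l iN m = l[iN] :: pvWin l (iN+1) m := pvWin_cons l hiN hlen
      rw [hwin] at h1 h2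
      obtain ⟨hgd, hrep2⟩ := pvRep_pop h1
      have hstep : pvShrinkA l k target (f+1) (d, count, (iN : Int))
          = pvShrinkA l k target f
              (( if (d.insert l[iN] (d.getD l[iN] 0 - 1)).getD l[iN] 0 = 0
                 then (d.insert l[iN] (d.getD l[iN] 0 - 1)).erase l[iN]
                 else d.insert l[iN] (d.getD l[iN] 0 - 1)),
               (if (d.insert l[iN] (d.getD l[iN] 0 - 1)).getD l[iN] 0 = k - 1 then count - 1 else count),
               ((iN : Int) + 1)) := by
        show (if target < (d.size : Int) then _ else _) = _
        rw [if_pos hgt, hpy]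
        rfl
      have hcount2 : (if (d.insert l[iN] (d.getD l[iN] 0 - 1)).getD l[iN] 0 = k - 1 then count - 1 else count)
          = pvSat k (pvWin l (iN+1) m) := by
        rw [pvSat_cons] at h2
        rw [hgd]
        split_ifs with hc1
        · rw [h2, if_pos (by omega)]
          ring
        · rw [h2, if_neg (by omega)]
      have hmin2 : (iN + 1 = 0 ∨ target < pvCard (pvWin l (iN+1-1) m)) := by
        right
        simpa using hcard ▸ hgt
      obtain ⟨d', count', iN', heq, hr1, hr2, hr3, hr4, hr5, hr6⟩ :=
        ih (iN+1) _ _ hrep2 hcount2 (by omega) hmin2 (by omega)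
      refine ⟨d', count', iN', ?_, hr1, hr2, by omega, hr4, hr5, hr6⟩
      rw [hstep]
      rw [show ((iN : Int) + 1) = ((iN + 1 : Nat) : Int) by push_cast; ring]
      exact heq
    · refine ⟨d, count, iN, ?_, h1, h2, le_refl _, h3, ?_, h4⟩
      · show (if target < (d.size : Int) then _ else _) = _
        rw [if_neg hgt]
      · rw [← pvRep_size h1]
        omega

def pvBound (l : List Char) (k target : Int) (m : Nat) (res : Int) : Prop :=
  0 ≤ res ∧ ∀ i' j' : Nat, i' ≤ j' → j' < m → pvGood l k target i' j' → (j' : Int) - (i' : Int) + 1 ≤ res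

def pvAttain (l : List Char) (k target : Int) (m : Nat) (res : Int) : Prop :=
  res = 0 ∨ ∃ i' j' : Nat, i' ≤ j' ∧ j' < m ∧ pvGood l k target i' j' ∧ res = (j' : Int) - (i' : Int) + 1

theorem pvWin_nonempty {l : List Char} {i m : Nat} (h1 : i < m) (h2 : m ≤ l.length) :
    pvWin l i m ≠ [] := by
  have := pvWin_length l i m h2
  intro h0
  rw [h0] at this
  simp at this
  omega

-- the column argument: if some window ending at m is good, the minimal-start window is good too
theorem pvGoodCol (l : List Char) (k target : Int) {m iN' i' : Nat}
    (hm : m < l.length) (hi' : i' ≤ m)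
    (hcardle : pvCard (pvWin l iN' (m+1)) ≤ target)
    (hmin : iN' = 0 ∨ target < pvCard (pvWin l (iN'-1) (m+1)))
    (hg : pvGood l k target i' m) :
    pvCard (pvWin l iN' (m+1)) = target ∧ pvSat k (pvWin l iN' (m+1)) = target ∧ iN' ≤ i' := by
  obtain ⟨hgc, hgs⟩ := hg
  have hle : iN' ≤ i' := by
    by_contra hlt
    rcases hmin with h0 | hgt
    · omega
    · have hsub : pvWin l (iN'-1) (m+1) ⊆ pvWin l i' (m+1) := pvWin_subset_start l (by omega)
      have := pvCard_mono hsub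
      omega
  have hcard : pvCard (pvWin l iN' (m+1)) = target := by
    have hsub : pvWin l i' (m+1) ⊆ pvWin l iN' (m+1) := pvWin_subset_start l hle
    have := pvCard_mono hsub
    omega
  refine ⟨hcard, ?_, hle⟩
  by_cases hk : 1 ≤ k
  · have hall : ∀ c ∈ pvWin l i' (m+1), k ≤ ((pvWin l i' (m+1)).count c : Int) :=
      pvSat_all_of_eq_card hk (by rw [hgs, hgc])
    have hsubl : (pvWin l i' (m+1)).Sublist (pvWin l iN' (m+1)) := pvWin_sublist_start l hle
    have hsetle : (pvWin l i' (m+1)).toFinset ⊆ (pvWin l iN' (m+1)).toFinset := by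
      intro x hx
      exact List.mem_toFinset.mpr (hsubl.subset (List.mem_toFinset.mp hx))
    have hseteq : (pvWin l i' (m+1)).toFinset = (pvWin l iN' (m+1)).toFinset := by
      apply Finset.eq_of_subset_of_card_le hsetle
      have : pvCard (pvWin l iN' (m+1)) = pvCard (pvWin l i' (m+1)) := by
        rw [hcard, hgc]
      unfold pvCard at this
      omega
    have hallout : ∀ c ∈ pvWin l iN' (m+1), k ≤ ((pvWin l iN' (m+1)).count c : Int) := by
      intro c hc
      have hcin : c ∈ pvWin l i' (m+1) := by
        have : c ∈ (pvWin l i' (m+1)).toFinset := hseteq ▸ List.mem_toFinset.mpr hc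
        exact List.mem_toFinset.mp this
      calc k ≤ ((pvWin l i' (m+1)).count c : Int) := hall c hcin
        _ ≤ ((pvWin l iN' (m+1)).count c : Int) := by exact_mod_cast hsubl.count_le c
    rw [pvSat_eq_card hk hallout, hcard]
  · have hne : pvWin l i' (m+1) ≠ [] := pvWin_nonempty (by omega) (by omega)
    have hpos := pvCard_pos hne
    have hts : pvSat k (pvWin l i' (m+1)) = 0 := by unfold pvSat; rw [if_neg hk]
    rw [hts] at hgs
    omega

def pvInvA (l : List Char) (k target : Int) (m : Nat)
    (st : PySem.Dict Char Int × Int × Int × Int) : Prop :=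
  ∃ iN : Nat, st.2.2.1 = (iN : Int) ∧ iN ≤ m ∧ pvRep st.1 (pvWin l iN m) ∧
    st.2.1 = pvSat k (pvWin l iN m) ∧ pvCard (pvWin l iN m) ≤ target ∧
    (iN = 0 ∨ target < pvCard (pvWin l (iN-1) m)) ∧
    pvBound l k target m st.2.2.2 ∧ pvAttain l k target m st.2.2.2

theorem pvInvA_step (l : List Char) (k target : Int) (ht : 0 ≤ target) {m : Nat}
    (hm : m < l.length) (st : PySem.Dict Char Int × Int × Int × Int)
    (h : pvInvA l k target m st) :
    pvInvA l k target (m+1) (pvStepA l k target st (m : Int)) := by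
  obtain ⟨d, count, i, res⟩ := st
  obtain ⟨iN, hi, hiN, hrep, hcount, hcardle, hmin, hbound, hattain⟩ := h
  simp only at hi hrep hcount hcardle hmin hbound hattain
  subst hi
  have hpy : PySem.List.pyGet? l (m : Int) = some l[m] := by
    rw [PySem.List.pyGet?_natCast, List.getElem?_eq_getElem hm]
  set c := l[m] with hc
  have hwin1 : pvWin l iN (m+1) = pvWin l iN m ++ [c] := pvWin_snoc l hiN hm
  have hrep1 : pvRep (d.insert c (d.getD c 0 + 1)) (pvWin l iN (m+1)) := by
    rw [hwin1]; exact pvRep_bump hrep c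
  have hgd1 : (d.insert c (d.getD c 0 + 1)).getD c 0 = ((pvWin l iN (m+1)).count c : Int) :=
    pvRep_getD hrep1 c
  have hcnt1 : (pvWin l iN (m+1)).count c = (pvWin l iN m).count c + 1 := by
    rw [hwin1]; simp
  have hcount1 : (if (d.insert c (d.getD c 0 + 1)).getD c 0 = k then count + 1 else count)
      = pvSat k (pvWin l iN (m+1)) := by
    rw [hwin1, pvSat_snoc, hgd1, hcnt1, hcount]
    split_ifs with h1 h2 h2 <;> push_cast at h1 ⊢ <;> omega
  have hmin1 : iN = 0 ∨ target < pvCard (pvWin l (iN-1) (m+1)) := by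
    rcases hmin with h0 | hgt
    · exact Or.inl h0
    · right
      have := pvCard_mono (pvWin_subset_stop l (by omega : m ≤ m + 1) (i := iN - 1))
      omega
  obtain ⟨d', count', iN', heq, hr1, hr2, hr3, hr4, hr5, hr6⟩ :=
    pvShrink_spec l k target ht (by omega : m + 1 ≤ l.length) (l.length + 1) iN _ _
      hrep1 hcount1 (by omega) hmin1 (by omega)
  have hstep : pvStepA l k target (d, count, (iN : Int), res) (m : Int)
      = (d', count',  (iN' : Int),
          if (d'.size : Int) = target ∧ (d'.size : Int) = count'
          then max res ((m : Int) - (iN' : Int) + 1) else res) := by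
    have heq' : pvShrinkA l k target (l.length + 1)
        ((d.modify c 0 (· + 1)),
         (if (d.modify c 0 (· + 1)).getD c 0 = k then count + 1 else count), (iN : Int))
        = (d', count', (iN' : Int)) := heq
    simp only [pvStepA]
    rw [hpy]
    simp only []
    rw [heq']
  rw [hstep]
  have hsize : (d'.size : Int) = pvCard (pvWin l iN' (m+1)) := pvRep_size hr1
  refine ⟨iN', rfl, hr4, hr1, hr2, hr5, hr6, ?_, ?_⟩
  · -- bound
    constructor
    · split_ifs
      · exact le_trans hbound.1 (le_max_left _ _)
      · exact hbound.1
    · intro i' j' hij hjm hg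
      by_cases hjlt : j' < m
      · have := hbound.2 i' j' hij hjlt hg
        split_ifs
        · exact le_trans this (le_max_left _ _)
        · exact this
      · have hjm' : j' = m := by omega
        rw [hjm'] at hg ⊢
        obtain ⟨hcardeq, hsateq, hile⟩ := pvGoodCol l k target hm (by omega : i' ≤ m) hr5 hr6 hg
        have hfire : (d'.size : Int) = target ∧ (d'.size : Int) = count' := by
          rw [hsize, hcardeq, hr2, hsateq]
          exact ⟨rfl, rfl⟩
        rw [if_pos hfire]
        have : (m : Int) - (i' : Int) + 1 ≤ (m : Int) - (iN' : Int) + 1 := by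
          omega
        exact le_trans this (le_max_right _ _)
  · -- attain
    split_ifs with hfire
    · rcases le_total res ((m : Int) - (iN' : Int) + 1) with hle | hle
      · rw [max_eq_right hle]
        by_cases hi'm : iN' ≤ m
        · right
          refine ⟨iN', m, hi'm, by omega, ?_, rfl⟩
          exact ⟨by rw [← hsize, hfire.1], by rw [← hr2, ← hfire.2, hfire.1]⟩
        · have him1 : iN' = m + 1 := by omega
          subst him1
          left
          push_cast at hle ⊢
          omega
      · rw [max_eq_left hle]
        rcases hattain with h0 | ⟨i', j', h1, h2, h3, h4⟩
        · exact Or.inl h0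
        · exact Or.inr ⟨i', j', h1, by omega, h3, h4⟩
    · rcases hattain with h0 | ⟨i', j', h1, h2, h3, h4⟩
      · exact Or.inl h0
      · exact Or.inr ⟨i', j', h1, by omega, h3, h4⟩

theorem pvInvA_fold (l : List Char) (k target : Int) (ht : 0 ≤ target) :
    ∀ m, m ≤ l.length →
      pvInvA l k target m (((List.range m).map (fun j : Nat => (j : Int))).foldl
        (pvStepA l k target) (PySem.Dict.empty, 0, 0, 0)) := by
  intro m
  induction m with
  | zero =>
    intro _
    refine ⟨0, rfl, le_refl _, ?_, ?_, ?_, Or.inl rfl, ⟨le_refl _, ?_⟩, Or.inl rfl⟩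
    · rw [pvWin_of_le l (le_refl 0)]
      exact pvRep_empty
    · rw [pvWin_of_le l (le_refl 0), pvSat_nil]
      rfl
    · rw [pvWin_of_le l (le_refl 0), pvCard_nil]
      exact ht
    · intro i' j' _ h2 _
      omega
  | succ m ih =>
    intro hm1
    rw [List.range_succ, List.map_append, List.foldl_append]
    exact pvInvA_step l k target ht (by omega) _ (ih (by omega))

-- ===== B side =====

theorem pvInnerB_spec (l : List Char) (k target : Int) (iN : Nat) :
    ∀ (rem j0 : Nat), j0 + rem = l.length → iN ≤ j0 →
    ∀ (d : PySem.Dict Char Int) (count res : Int),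
      pvRep d (pvWin l iN j0) → count = pvSat k (pvWin l iN j0) →
      pvCard (pvWin l iN j0) ≤ target →
      res ≤ pvInnerB l k target (iN : Int) (PySem.List.pyRange (j0 : Int) (l.length : Int)) (d, count, res) ∧
      (∀ j' : Nat, j0 ≤ j' → j' < l.length → pvGood l k target iN j' →
        (j' : Int) - (iN : Int) + 1 ≤ pvInnerB l k target (iN : Int) (PySem.List.pyRange (j0 : Int) (l.length : Int)) (d, count, res)) ∧
      (pvInnerB l k target (iN : Int) (PySem.List.pyRange (j0 : Int) (l.length : Int)) (d, count, res) = res ∨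
        ∃ j' : Nat, iN ≤ j' ∧ j' < l.length ∧ pvGood l k target iN j' ∧
          pvInnerB l k target (iN : Int) (PySem.List.pyRange (j0 : Int) (l.length : Int)) (d, count, res) = (j' : Int) - (iN : Int) + 1) := by
  intro rem
  induction rem with
  | zero =>
    intro j0 hj0 hij d count res hrep hcount hcard
    have hj0l : j0 = l.length := by omega
    have hnil : PySem.List.pyRange (j0 : Int) (l.length : Int) = [] := by
      rw [hj0l]
      simp [PySem.List.pyRange]
    rw [hnil]
    refine ⟨le_refl _, ?_, Or.inl rfl⟩
    intro j' h1 h2 _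
    omega
  | succ rem ih =>
    intro j0 hj0 hij d count res hrep hcount hcard
    have hj0l : j0 < l.length := by omega
    have hcons : PySem.List.pyRange (j0 : Int) (l.length : Int)
        = (j0 : Int) :: PySem.List.pyRange ((j0 : Int) + 1) (l.length : Int) :=
      PySem.List.pyRange_one_cons (by exact_mod_cast hj0l)
    have hpy : PySem.List.pyGet? l (j0 : Int) = some l[j0] := by
      rw [PySem.List.pyGet?_natCast, List.getElem?_eq_getElem hj0l]
    set c := l[j0] with hc
    have hwin1 : pvWin l iN (j0+1) = pvWin l iN j0 ++ [c] := pvWin_snoc l hij hj0l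
    have hrep1 : pvRep (d.insert c (d.getD c 0 + 1)) (pvWin l iN (j0+1)) := by
      rw [hwin1]; exact pvRep_bump hrep c
    have hgd1 : (d.insert c (d.getD c 0 + 1)).getD c 0 = ((pvWin l iN (j0+1)).count c : Int) :=
      pvRep_getD hrep1 c
    have hcnt1 : (pvWin l iN (j0+1)).count c = (pvWin l iN j0).count c + 1 := by
      rw [hwin1]; simp
    have hcount1 : (if (d.insert c (d.getD c 0 + 1)).getD c 0 = k then count + 1 else count)
        = pvSat k (pvWin l iN (j0+1)) := by
      rw [hwin1, pvSat_snoc, hgd1, hcnt1, hcount]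
      split_ifs with h1 h2 h2 <;> push_cast at h1 ⊢ <;> omega
    have hsize1 : ((d.insert c (d.getD c 0 + 1)).size : Int) = pvCard (pvWin l iN (j0+1)) :=
      pvRep_size hrep1
    have hunf : pvInnerB l k target (iN : Int) (PySem.List.pyRange (j0 : Int) (l.length : Int)) (d, count, res)
        = (if target < ((d.insert c (d.getD c 0 + 1)).size : Int) then res
           else pvInnerB l k target (iN : Int) (PySem.List.pyRange ((j0 : Int) + 1) (l.length : Int))
             (d.insert c (d.getD c 0 + 1),
              (if (d.insert c (d.getD c 0 + 1)).getD c 0 = k then count + 1 else count),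
              (if ((d.insert c (d.getD c 0 + 1)).size : Int) = target ∧
                  (if (d.insert c (d.getD c 0 + 1)).getD c 0 = k then count + 1 else count) = target
               then max res ((j0 : Int) - (iN : Int) + 1) else res))) := by
      rw [hcons]
      show (match PySem.List.pyGet? l (j0 : Int) with
        | none => res
        | some c => _) = _
      rw [hpy]
    by_cases hbrk : target < ((d.insert c (d.getD c 0 + 1)).size : Int)
    · rw [hunf, if_pos hbrk]
      refine ⟨le_refl _, ?_, Or.inl rfl⟩
      intro j' h1 h2 hg
      exfalso
      have hsub : pvWin l iN (j0+1) ⊆ pvWin l iN (j'+1) := pvWin_subset_stop l (by omega)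
      have := pvCard_mono hsub
      rw [hsize1] at hbrk
      obtain ⟨hgc, _⟩ := hg
      omega
    · have hcard1 : pvCard (pvWin l iN (j0+1)) ≤ target := by
        rw [← hsize1]; omega
      set count1 := (if (d.insert c (d.getD c 0 + 1)).getD c 0 = k then count + 1 else count) with hcount1def
      set res1 := (if ((d.insert c (d.getD c 0 + 1)).size : Int) = target ∧ count1 = target
               then max res ((j0 : Int) - (iN : Int) + 1) else res) with hres1def
      obtain ⟨hb1, hb2, hb3⟩ := ih (j0+1) (by omega) (by omega) _ count1 res1 hrep1 hcount1 hcard1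
      rw [hunf, if_neg hbrk]
      have hres1ge : res ≤ res1 := by
        rw [hres1def]
        split_ifs
        · exact le_max_left _ _
        · exact le_refl _
      have hcast : ((j0 + 1 : Nat) : Int) = (j0 : Int) + 1 := by push_cast; ring
      rw [← hcast]
      refine ⟨le_trans hres1ge hb1, ?_, ?_⟩
      · intro j' h1 h2 hg
        by_cases hj' : j0 + 1 ≤ j'
        · exact hb2 j' hj' h2 hg
        · have hj'eq : j' = j0 := by omega
          rw [hj'eq] at hg ⊢
          have hfire : ((d.insert c (d.getD c 0 + 1)).size : Int) = target ∧ count1 = target :=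
            ⟨by rw [hsize1]; exact hg.1, by rw [hcount1]; exact hg.2⟩
          have : res1 = max res ((j0 : Int) - (iN : Int) + 1) := by
            rw [hres1def, if_pos hfire]
          calc (j0 : Int) - (iN : Int) + 1 ≤ res1 := by rw [this]; exact le_max_right _ _
            _ ≤ _ := hb1
      · rcases hb3 with h0 | ⟨j', hj1, hj2, hj3, hj4⟩
        · rw [h0, hres1def]
          split_ifs with hfire
          · rcases le_total res ((j0 : Int) - (iN : Int) + 1) with hle | hle
            · right
              refine ⟨j0, hij, hj0l, ?_, max_eq_right hle⟩
              constructor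
              · rw [← hsize1, hfire.1]
              · rw [← hcount1]
                exact hfire.2
            · left
              exact max_eq_left hle
          · left; rfl
        · right
          exact ⟨j', hj1, hj2, hj3, hj4⟩

def pvInvB (l : List Char) (k target : Int) (m : Nat) (res : Int) : Prop :=
  0 ≤ res ∧
  (∀ i' j' : Nat, i' < m → i' ≤ j' → j' < l.length → pvGood l k target i' j' →
    (j' : Int) - (i' : Int) + 1 ≤ res) ∧
  pvAttain l k target l.length res

theorem pvInvB_fold (l : List Char) (k target : Int) (ht : 0 ≤ target) :
    ∀ m, m ≤ l.length →
      pvInvB l k target m (((List.range m).map (fun j : Nat => (j : Int))).foldl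
        (fun res i => pvInnerB l k target i (PySem.List.pyRange i (l.length : Int)) (PySem.Dict.empty, 0, res)) 0) := by
  intro m
  induction m with
  | zero =>
    intro _
    refine ⟨le_refl _, ?_, Or.inl rfl⟩
    intro i' j' h1 _ _ _
    omega
  | succ m ih =>
    intro hm1
    rw [List.range_succ, List.map_append, List.foldl_append]
    obtain ⟨h0, hb, ha⟩ := ih (by omega)
    set res := ((List.range m).map (fun j : Nat => (j : Int))).foldl
        (fun res i => pvInnerB l k target i (PySem.List.pyRange i (l.length : Int)) (PySem.Dict.empty, 0, res)) 0 with hres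
    simp only [List.map_cons, List.map_nil, List.foldl_cons, List.foldl_nil]
    have hwin0 : pvWin l m m = [] := pvWin_of_le l (le_refl m)
    obtain ⟨hc1, hc2, hc3⟩ := pvInnerB_spec l k target m (l.length - m) m (by omega) (le_refl m)
      PySem.Dict.empty 0 res (by rw [hwin0]; exact pvRep_empty) (by rw [hwin0, pvSat_nil])
      (by rw [hwin0, pvCard_nil]; exact ht)
    refine ⟨le_trans h0 hc1, ?_, ?_⟩
    · intro i' j' h1 h2 h3 hg
      by_cases him : i' < m
      · exact le_trans (hb i' j' him h2 h3 hg) hc1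
      · have : i' = m := by omega
        subst this
        exact hc2 j' h2 h3 hg
    · rcases hc3 with hc | ⟨j', hj1, hj2, hj3, hj4⟩
      · rw [hc]
        exact ha
      · exact Or.inr ⟨m, j', hj1, hj2, hj3, hj4⟩

theorem pvUnique {l : List Char} {k target : Int} {r1 r2 : Int}
    (b1 : pvBound l k target l.length r1) (a1 : pvAttain l k target l.length r1)
    (b2 : pvBound l k target l.length r2) (a2 : pvAttain l k target l.length r2) :
    r1 = r2 := by
  have h12 : r1 ≤ r2 := by
    rcases a1 with h0 | ⟨i', j', h1, h2, h3, h4⟩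
    · rw [h0]; exact b2.1
    · rw [h4]; exact b2.2 i' j' h1 h2 h3
  have h21 : r2 ≤ r1 := by
    rcases a2 with h0 | ⟨i', j', h1, h2, h3, h4⟩
    · rw [h0]; exact b1.1
    · rw [h4]; exact b1.2 i' j' h1 h2 h3
  omega

theorem pvMain (s : String) (k target : Int) (hpre : 0 ≤ target ∨ s = "") :
    longestSubstringWithUnique s k target = longestSubstringWithUnique_alt s k target := by
  by_cases ht : 0 ≤ target
  · have hA : longestSubstringWithUnique s k target
        = (((List.range s.toList.length).map (fun j : Nat => (j : Int))).foldl
            (pvStepA s.toList k target) (PySem.Dict.empty, 0, 0, 0)).2.2.2 := by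
      unfold longestSubstringWithUnique
      rw [PySem.List.pyRange_zero_natCast]
    have hB : longestSubstringWithUnique_alt s k target
        = ((List.range s.toList.length).map (fun j : Nat => (j : Int))).foldl
            (fun res i => pvInnerB s.toList k target i
              (PySem.List.pyRange i (s.toList.length : Int)) (PySem.Dict.empty, 0, res)) 0 := by
      unfold longestSubstringWithUnique_alt
      rw [PySem.List.pyRange_zero_natCast]
    obtain ⟨iN, _, _, _, _, _, _, hbA, haA⟩ :=
      pvInvA_fold s.toList k target ht s.toList.length (le_refl _)
    obtain ⟨h0B, hbB, haB⟩ := pvInvB_fold s.toList k target ht s.toList.length (le_refl _)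
    rw [hA, hB]
    exact pvUnique hbA haA
      ⟨h0B, fun i' j' h1 h2 h3 => hbB i' j' (by omega) h1 h2 h3⟩ haB
  · have hs : s = "" := hpre.resolve_left ht
    subst hs
    rfl

-- ===== VERDICT (by name: the statement is the Claim_ definition above) =====
theorem longestSubstringWithUnique_spec : Claim_equal_longestSubstringWithUnique := by
  intro s k target _ hpre
  unfold Spec_longestSubstringWithUnique
  exact pvMain s k target hpre
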